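-- pv_equiv track=rewrite | github.com/Duck-Frontend/Course-Homework | 6_lesson_homework/main.py | twelve
-- ===== SOURCE A (Python) =====
-- def twelve(matrix, h):
--     columns_with_h = []
--     columns_without_h = []
--
--     for j in range(len(matrix[0])):
--         found = False
--         for row in matrix:
--             if row[j] == h:
--                 found = True
--                 break
--
--         if found:
--             columns_with_h.append(j)
--         else:
--             columns_without_h.append(j)
--
--     return columns_with_h, columns_without_h
-- ===== SOURCE B (Python) =====
-- def twelve(matrix, h):
--     w = len(matrix[0])
--     present = set()
--     for row in matrix:
--         for j, v in enumerate(row[:w]):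
--             if v == h:
--                 present.add(j)
--     columns_with_h = [j for j in range(w) if j in present]
--     columns_without_h = [j for j in range(w) if j not in present]
--     return columns_with_h, columns_without_h
-- ===== Notes on version B (the rewrite author's own statement) =====
-- stated objective: alternative
-- what changed: Replaces the per-column inner scan with early break by one row-major pass that builds the set of column indices where h occurs, then a single partitioning pass over range(w); Pre_ excludes the empty matrix and ragged matrices, where A can raise IndexError (where A still returns, B agrees, see cites).
-- outside the precondition, e.g. on twelve([[5], []], 5): A returns ([0], []), B returns ([0], [])
import Mathlib
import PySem

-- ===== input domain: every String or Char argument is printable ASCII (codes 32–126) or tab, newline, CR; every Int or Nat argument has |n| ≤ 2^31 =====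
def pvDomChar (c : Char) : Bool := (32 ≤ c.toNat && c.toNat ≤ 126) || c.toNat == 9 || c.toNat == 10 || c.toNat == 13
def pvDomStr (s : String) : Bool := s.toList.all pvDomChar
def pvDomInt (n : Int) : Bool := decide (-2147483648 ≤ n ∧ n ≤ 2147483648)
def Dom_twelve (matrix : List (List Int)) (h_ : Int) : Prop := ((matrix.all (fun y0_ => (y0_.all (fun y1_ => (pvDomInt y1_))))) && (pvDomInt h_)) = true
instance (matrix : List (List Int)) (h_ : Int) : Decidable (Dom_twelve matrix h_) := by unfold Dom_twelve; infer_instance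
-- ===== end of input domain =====

-- B builds the set of column indices containing h in one row-major pass, then partitions range(w) once
-- (alternative decomposition, same cost); A scans each column with an early break.

-- ===== PORT A =====
-- inner 'for row in matrix: if row[j] == h: found = True; break'
-- (the 'none' branch of pyGet? is Python's IndexError, excluded by Pre_twelve)
def twelveFound (matrix : List (List Int)) (h_ : Int) (j : Int) : Bool :=
  match matrix with
  | [] => false
  | row :: rest =>
    match PySem.List.pyGet? row j with
    | some v => if v == h_ then true else twelveFound rest h_ j
    | none => twelveFound rest h_ j

def twelve (matrix : List (List Int)) (h_ : Int) : List Int × List Int :=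
  (PySem.List.pyRange 0 ((matrix.headD []).length : Int) 1).foldl
    (fun (acc : List Int × List Int) j =>
      if twelveFound matrix h_ j then (acc.1 ++ [j], acc.2) else (acc.1, acc.2 ++ [j]))
    ([], [])

-- ===== PORT B =====
-- the set 'present' built by Source B's two nested loops (w = len(matrix[0]))
def altPresent (matrix : List (List Int)) (h_ : Int) (w : Nat) : PySem.Set Int :=
  matrix.foldl
    (fun s row =>
      (PySem.List.enumerate (PySem.List.slice row none (some (w : Int))) 0).foldl
        (fun s p => if p.2 == h_ then PySem.Set.add s p.1 else s) s)
    PySem.Set.empty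

def twelve_alt (matrix : List (List Int)) (h_ : Int) : List Int × List Int :=
  ((PySem.List.pyRange 0 ((matrix.headD []).length : Int) 1).filter
      (fun j => PySem.Set.contains (altPresent matrix h_ (matrix.headD []).length) j),
   (PySem.List.pyRange 0 ((matrix.headD []).length : Int) 1).filter
      (fun j => !(PySem.Set.contains (altPresent matrix h_ (matrix.headD []).length) j)))

-- ===== PRECONDITION & SPEC =====
-- Pre_ excludes the empty matrix (A raises IndexError on matrix[0]) and ragged matrices with a row
-- shorter than the first one, on which A raises IndexError unless an early break happens to skip the
-- short row; where A does return on such inputs, B returns the same value (see the cited example).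
def Pre_twelve (matrix : List (List Int)) (h_ : Int) : Prop :=
  matrix ≠ [] ∧ ∀ row ∈ matrix, (matrix.headD []).length ≤ row.length
instance (matrix : List (List Int)) (h_ : Int) : Decidable (Pre_twelve matrix h_) := by
  unfold Pre_twelve; infer_instance

def pvWitness_twelve : List (List Int) × Int := ([[1, 2], [3, 2]], 2)

def Spec_twelve (matrix : List (List Int)) (h_ : Int) (out : List Int × List Int) : Prop := out = twelve_alt matrix h_
instance (matrix : List (List Int)) (h_ : Int) (out : List Int × List Int) : Decidable (Spec_twelve matrix h_ out) := by unfold Spec_twelve; infer_instance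

-- ===== CLAIM (what is proved, stated in full; the proofs are below) =====
def Claim_equal_twelve : Prop := ∀ (matrix : List (List Int)) (h_ : Int), Dom_twelve matrix h_ → Pre_twelve matrix h_ → Spec_twelve matrix h_ (twelve matrix h_)

-- ===== LEMMAS AND PROOFS =====

-- A's outer loop from a pair accumulator is the pair of filters.
theorem pv_foldl_pair (xs : List Int) (p : Int → Bool) (l1 l2 : List Int) :
    xs.foldl (fun (acc : List Int × List Int) j =>
        if p j then (acc.1 ++ [j], acc.2) else (acc.1, acc.2 ++ [j])) (l1, l2)
      = (l1 ++ xs.filter p, l2 ++ xs.filter (fun j => !p j)) := by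
  induction xs generalizing l1 l2 with
  | nil => simp
  | cons x xs ih =>
    by_cases hx : p x = true <;> simp [hx, ih]

-- membership in B's inner fold
theorem pv_mem_inner (h_ : Int) (ps : List (Int × Int)) (s : PySem.Set Int) (j : Int) :
    (j ∈ ps.foldl (fun s p => if p.2 == h_ then PySem.Set.add s p.1 else s) s)
      ↔ j ∈ s ∨ ∃ p ∈ ps, p.2 = h_ ∧ p.1 = j := by
  induction ps generalizing s with
  | nil => simp
  | cons q ps ih =>
    simp only [List.foldl_cons]
    rw [ih]
    by_cases hq : q.2 = h_ <;> simp [hq, PySem.Set.mem_add] <;> aesop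

-- membership in B's set after the outer fold
theorem pv_mem_present (matrix : List (List Int)) (h_ : Int) (w : Nat) (s : PySem.Set Int) (j : Int) :
    (j ∈ matrix.foldl
        (fun s row =>
          (PySem.List.enumerate (PySem.List.slice row none (some (w : Int))) 0).foldl
            (fun s p => if p.2 == h_ then PySem.Set.add s p.1 else s) s) s)
      ↔ j ∈ s ∨ ∃ row ∈ matrix, ∃ p ∈ PySem.List.enumerate (PySem.List.slice row none (some (w : Int))) 0,
            p.2 = h_ ∧ p.1 = j := by
  induction matrix generalizing s with
  | nil => simp
  | cons row rest ih =>
    simp only [List.foldl_cons]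
    rw [ih, pv_mem_inner]
    aesop

-- per-column: A's found flag ↔ B's set membership, under Pre_ and 0 ≤ j < w
theorem pv_found_iff (matrix : List (List Int)) (h_ : Int) (w : Nat) (j : Int)
    (hrows : ∀ row ∈ matrix, w ≤ row.length) (hj0 : 0 ≤ j) (hjw : j < (w : Int)) :
    twelveFound matrix h_ j = true
      ↔ ∃ row ∈ matrix, ∃ p ∈ PySem.List.enumerate (PySem.List.slice row none (some (w : Int))) 0,
          p.2 = h_ ∧ p.1 = j := by
  induction matrix with
  | nil => simp [twelveFound]
  | cons row rest ih =>
    have hlen : w ≤ row.length := hrows row (by simp)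
    have hrest : ∀ r ∈ rest, w ≤ r.length := fun r hr => hrows r (by simp [hr])
    have hjnat : j.toNat < w := by omega
    have hjl : j.toNat < row.length := by omega
    have hget : PySem.List.pyGet? row j = some row[j.toNat] := by
      rw [PySem.List.pyGet?_of_nonneg row hj0, List.getElem?_eq_getElem hjl]
    have hslice : PySem.List.slice row none (some (w : Int)) = row.take w :=
      PySem.List.slice_to_natCast row w
    -- head row's enumerate condition ↔ row[j.toNat] = h_
    have hhead : (∃ p ∈ PySem.List.enumerate (PySem.List.slice row none (some (w : Int))) 0,
          p.2 = h_ ∧ p.1 = j) ↔ row[j.toNat] = h_ := by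
      rw [hslice]
      constructor
      · rintro ⟨p, hp, hv, hidx⟩
        rcases (PySem.List.mem_enumerate_iff _ _ _).mp hp with ⟨k, hk, rfl⟩
        simp only at hv hidx
        have hkj : k = j.toNat := by omega
        subst hkj
        simpa [List.getElem_take] using hv
      · intro hv
        refine ⟨((0 : Int) + (j.toNat : Int), (row.take w)[j.toNat]'(by simp; omega)), ?_, ?_, by omega⟩
        · exact (PySem.List.mem_enumerate_iff _ _ _).mpr ⟨j.toNat, by simp; omega, rfl⟩
        · simpa [List.getElem_take] using hv
    have hstep : twelveFound (row :: rest) h_ j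
        = if row[j.toNat] == h_ then true else twelveFound rest h_ j := by
      conv_lhs => rw [twelveFound]
      rw [hget]
    rw [hstep]
    by_cases hv : row[j.toNat] = h_
    · rw [if_pos (by simpa using hv)]
      exact iff_of_true rfl ⟨row, by simp, hhead.mpr hv⟩
    · rw [if_neg (by simpa using hv), ih hrest]
      constructor
      · rintro ⟨r, hr, h⟩; exact ⟨r, by simp [hr], h⟩
      · rintro ⟨r, hr, h⟩
        rcases List.mem_cons.mp hr with rfl | hr
        · exact absurd (hhead.mp h) hv
        · exact ⟨r, hr, h⟩

-- ===== VERDICT (by name: the statement is the Claim_ definition above) =====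
theorem twelve_spec : Claim_equal_twelve := by
  intro matrix h_ _ hpre
  obtain ⟨hne, hrows⟩ := hpre
  unfold Spec_twelve twelve twelve_alt
  rw [pv_foldl_pair]
  have hpt : ∀ j ∈ PySem.List.pyRange 0 ((matrix.headD []).length : Int) 1,
      twelveFound matrix h_ j
        = PySem.Set.contains (altPresent matrix h_ (matrix.headD []).length) j := by
    intro j hj
    have hjr := (PySem.List.mem_pyRange_one).mp hj
    rw [Bool.eq_iff_iff, PySem.Set.contains_iff]
    unfold altPresent
    rw [pv_mem_present,
        pv_found_iff matrix h_ (matrix.headD []).length j hrows hjr.1 hjr.2]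
    simp [PySem.Set.empty]
  rw [List.nil_append, List.nil_append, List.filter_congr hpt,
      List.filter_congr (fun j hj => by rw [hpt j hj] :
        ∀ j ∈ PySem.List.pyRange 0 ((matrix.headD []).length : Int) 1,
          (!twelveFound matrix h_ j)
            = !(PySem.Set.contains (altPresent matrix h_ (matrix.headD []).length) j))]
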